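-- pv_equiv track=rewrite | github.com/IrinaShcherbakova/Leetcode-Python | leetcode/easy/surfaceArea.py | findPieceSurface
-- ===== SOURCE A (Python) =====
-- def findPieceSurface(size: int) -> int:
--     standard = 6
--     if size == 1:
--         return standard
--     total = standard * size
--     for i in range(size):
--         if i == 0 or i == size - 1:
--             total -= 1
--         else:
--             total -= 2
--     return total
-- ===== SOURCE B (Python) =====
-- def findPieceSurface(size: int) -> int:
--     return 6 * size - 2 * max(size - 1, 0)
-- ===== Notes on version B (the rewrite author's own statement) =====
-- stated objective: faster
-- what changed: Replaced the per-cube loop (which subtracts one for each end cube and two for each inner cube) by a closed-form arithmetic formula.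
import Mathlib
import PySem

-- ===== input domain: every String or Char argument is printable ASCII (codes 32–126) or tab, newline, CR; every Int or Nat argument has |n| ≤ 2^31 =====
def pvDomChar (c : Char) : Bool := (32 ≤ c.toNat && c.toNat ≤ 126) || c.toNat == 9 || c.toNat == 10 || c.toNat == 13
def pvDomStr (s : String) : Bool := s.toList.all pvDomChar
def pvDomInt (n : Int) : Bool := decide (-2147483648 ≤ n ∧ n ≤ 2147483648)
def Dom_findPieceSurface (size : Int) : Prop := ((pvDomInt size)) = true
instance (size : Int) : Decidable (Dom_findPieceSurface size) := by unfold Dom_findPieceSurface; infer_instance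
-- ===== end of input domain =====

-- B replaces A's per-cube loop by the closed-form 6*size - 2*max(size-1,0); asymptotically faster (O(1) vs O(n)).


-- ===== PORT A =====
def findPieceSurface (size : Int) : Int :=
  let standard : Int := 6
  if size = 1 then standard
  else
    (PySem.List.pyRange 0 size 1).foldl
      (fun total i => if i = 0 ∨ i = size - 1 then total - 1 else total - 2)
      (standard * size)

-- ===== PORT B =====
def findPieceSurface_alt (size : Int) : Int :=
  6 * size - 2 * max (size - 1) 0

-- ===== PRECONDITION & SPEC =====
def Spec_findPieceSurface (size : Int) (out : Int) : Prop := out = findPieceSurface_alt size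
instance (size : Int) (out : Int) : Decidable (Spec_findPieceSurface size out) := by unfold Spec_findPieceSurface; infer_instance

-- ===== CLAIM (what is proved, stated in full; the proofs are below) =====
def Claim_equal_findPieceSurface : Prop := ∀ (size : Int), Dom_findPieceSurface size → Spec_findPieceSurface size (findPieceSurface size)

-- ===== LEMMAS AND PROOFS =====

-- the loop body subtracts 2 for every index when the range contains neither 0 nor size-1
theorem pv_foldl_mid (size : Int) (a b : Int) (h0 : 0 < a) (hb : b ≤ size - 1) :
    ∀ (init : Int), (PySem.List.pyRange a b 1).foldl
      (fun total i => if i = 0 ∨ i = size - 1 then total - 1 else total - 2) init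
      = init - 2 * (max (b - a) 0) := by
  by_cases hab : b ≤ a
  · intro init
    rw [PySem.List.pyRange_one_eq_nil hab]
    simp only [List.foldl_nil]
    omega
  · push Not at hab
    have hn : (b - a).toNat ≠ 0 := by omega
    intro init
    rw [PySem.List.pyRange_one_cons hab]
    simp only [List.foldl_cons]
    have hne : ¬ (a = 0 ∨ a = size - 1) := by omega
    rw [if_neg hne]
    have ih := pv_foldl_mid size (a + 1) b (by omega) hb (init - 2)
    rw [ih]
    omega
termination_by (b - a).toNat
decreasing_by omega

theorem pv_loop_eval (size : Int) (h2 : 2 ≤ size) :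
    (PySem.List.pyRange 0 size 1).foldl
      (fun total i => if i = 0 ∨ i = size - 1 then total - 1 else total - 2) (6 * size)
      = 4 * size + 2 := by
  have ha : PySem.List.pyRange 0 1 1 = [(0 : Int)] := by decide
  have hb : PySem.List.pyRange 1 size 1 = PySem.List.pyRange 1 (size - 1) 1 ++ [size - 1] := by
    have h := PySem.List.pyRange_one_succ_right (show (1:Int) ≤ size - 1 by omega)
    rw [show size - 1 + 1 = size by omega] at h
    exact h
  rw [PySem.List.pyRange_one_append 0 1 size (by omega) (by omega), ha, hb]
  simp only [List.foldl_append, List.foldl_cons, List.foldl_nil]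
  simp only [true_or, or_true, if_true]
  rw [pv_foldl_mid size 1 (size - 1) (by omega) (by omega)]
  omega

-- ===== VERDICT (by name: the statement is the Claim_ definition above) =====
theorem findPieceSurface_spec : Claim_equal_findPieceSurface := by
  intro size _
  unfold Spec_findPieceSurface findPieceSurface findPieceSurface_alt
  by_cases h1 : size = 1
  · simp [h1]
  · simp only [if_neg h1]
    by_cases h2 : 2 ≤ size
    · rw [pv_loop_eval size h2]
      omega
    · rw [PySem.List.pyRange_one_eq_nil (by omega : size ≤ 0)]
      simp only [List.foldl_nil]
      omega
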